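-- pv_equiv track=rewrite | github.com/AndrewToaster/PyRoundAbout | utilities.py | parse_map
-- ===== SOURCE A (Python) =====
-- def parse_map(content: str, width: int, height: int) -> list[list[str]]:
--     lines = content.splitlines(False)
--     map = []
--     for y in range(height):
--         lst = []
--         for x in range(width):
--             if y < len(lines) and x < len(lines[y]):
--                 lst.append(lines[y][x])
--             else:
--                 lst.append(' ')
--         map.append(lst)
--     return map
-- ===== SOURCE B (Python) =====
-- def parse_map(content: str, width: int, height: int) -> list[list[str]]:
--     lines = content.splitlines(False)
--     w = max(width, 0)
--     return [list((lines[y] if y < len(lines) else '').ljust(w)[:w]) for y in range(height)]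
-- ===== Notes on version B (the rewrite author's own statement) =====
-- stated objective: simpler
-- what changed: Replaces the nested per-character loop with per-bounds test by one pad-and-truncate (ljust + slice) per row in a single comprehension.
import Mathlib
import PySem

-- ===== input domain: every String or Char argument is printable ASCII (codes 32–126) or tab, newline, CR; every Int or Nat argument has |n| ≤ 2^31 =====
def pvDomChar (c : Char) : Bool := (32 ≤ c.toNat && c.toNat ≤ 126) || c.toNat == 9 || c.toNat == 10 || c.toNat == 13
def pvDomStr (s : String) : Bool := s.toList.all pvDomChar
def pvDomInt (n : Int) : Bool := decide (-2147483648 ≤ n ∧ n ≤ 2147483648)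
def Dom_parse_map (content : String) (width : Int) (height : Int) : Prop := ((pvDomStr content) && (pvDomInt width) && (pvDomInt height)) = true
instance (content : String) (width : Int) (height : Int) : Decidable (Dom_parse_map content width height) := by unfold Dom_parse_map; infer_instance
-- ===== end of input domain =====

-- B replaces A's nested per-character loop (with an in-bounds test per cell) by one
-- pad-and-truncate (ljust + slice) per row; same output, simpler per-row structure.

-- ===== PORT A =====
def parse_map (content : String) (width : Int) (height : Int) : List (List String) :=
  let lines := PySem.Str.splitlines content
  (PySem.List.pyRange 0 height 1).foldl (fun map y =>
    let lst := (PySem.List.pyRange 0 width 1).foldl (fun lst x =>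
      if y < PySem.List.len lines ∧ x < PySem.Str.len (PySem.List.pyGetD lines y "") then
        -- lines[y][x]: in range under the condition just tested, so the ' ' default is never used
        lst ++ [String.ofList [(PySem.Str.pyGet? (PySem.List.pyGetD lines y "") x).getD ' ']]
      else
        lst ++ [" "]) []
    map ++ [lst]) []

-- ===== PORT B =====
-- line.ljust(w): pad on the right with spaces to length w (w : Nat here, since Source B clamps w = max(width, 0))
def pvLjust (cs : List Char) (w : Nat) : List Char := cs ++ List.replicate (w - cs.length) ' '

def parse_map_alt (content : String) (width : Int) (height : Int) : List (List String) :=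
  let lines := PySem.Str.splitlines content
  let w := (max width 0).toNat
  (PySem.List.pyRange 0 height 1).map (fun y =>
    let line := if y < PySem.List.len lines then PySem.List.pyGetD lines y "" else ""
    -- s[:w] with 0 ≤ w is take w; list(str) is the list of its one-char strings
    ((pvLjust line.toList w).take w).map (fun c => String.ofList [c]))

-- ===== PRECONDITION & SPEC =====
def Spec_parse_map (content : String) (width : Int) (height : Int) (out : List (List String)) : Prop := out = parse_map_alt content width height
instance (content : String) (width : Int) (height : Int) (out : List (List String)) : Decidable (Spec_parse_map content width height out) := by unfold Spec_parse_map; infer_instance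

-- ===== CLAIM (what is proved, stated in full; the proofs are below) =====
def Claim_equal_parse_map : Prop := ∀ (content : String) (width : Int) (height : Int), Dom_parse_map content width height → Spec_parse_map content width height (parse_map content width height)

-- ===== LEMMAS AND PROOFS =====

-- ljust-then-truncate row equals the indexed row with out-of-range defaulting to ' '
lemma pad_take (cs : List Char) (w : Nat) :
    (pvLjust cs w).take w = (List.range w).map (fun x => cs.getD x ' ') := by
  have hlen : ((pvLjust cs w).take w).length = w := by
    simp [pvLjust]; omega
  apply List.ext_getElem (by simp [hlen])
  intro i h1 h2
  simp only [pvLjust, List.getElem_take, List.getElem_map, List.getElem_range]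
  by_cases hi : i < cs.length
  · rw [List.getElem_append_left hi, List.getD_eq_getElem _ _ hi]
  · rw [List.getElem_append_right (by omega)]
    simp only [List.getElem_replicate, List.getD]
    rw [List.getElem?_eq_none (by omega : cs.length ≤ i)]
    rfl

-- one row: A's inner loop equals B's padded row, for any nonnegative row index k
lemma row_eq (lines : List String) (width : Int) (k : Nat) :
    (PySem.List.pyRange 0 width 1).foldl (fun lst x =>
      if (k : Int) < PySem.List.len lines ∧ x < PySem.Str.len (PySem.List.pyGetD lines (k : Int) "") then
        lst ++ [String.ofList [(PySem.Str.pyGet? (PySem.List.pyGetD lines (k : Int) "") x).getD ' ']]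
      else lst ++ [" "]) []
    = ((pvLjust (if (k : Int) < PySem.List.len lines then PySem.List.pyGetD lines (k : Int) "" else "").toList
          (max width 0).toNat).take (max width 0).toNat).map (fun c => String.ofList [c]) := by
  have hbody : (fun (lst : List String) (x : Int) =>
      if (k : Int) < PySem.List.len lines ∧ x < PySem.Str.len (PySem.List.pyGetD lines (k : Int) "") then
        lst ++ [String.ofList [(PySem.Str.pyGet? (PySem.List.pyGetD lines (k : Int) "") x).getD ' ']]
      else lst ++ [" "])
      = fun lst x => lst ++ [if (k : Int) < PySem.List.len lines ∧ x < PySem.Str.len (PySem.List.pyGetD lines (k : Int) "") then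
        String.ofList [(PySem.Str.pyGet? (PySem.List.pyGetD lines (k : Int) "") x).getD ' '] else " "] := by
    funext lst x; split <;> rfl
  rw [hbody, PySem.List.foldl_append_singleton_eq_map, List.nil_append, pad_take,
      PySem.List.pyRange_one, List.map_map]
  have hw : (width - 0).toNat = (max width 0).toNat := by omega
  rw [hw]
  simp only [List.map_map]
  apply List.map_congr_left
  intro j _
  simp only [Function.comp, zero_add]
  by_cases hk : (k : Int) < PySem.List.len lines
  · simp only [hk, true_and]
    set line := PySem.List.pyGetD lines (k : Int) "" with hline
    have hlen : PySem.Str.len line = (line.toList.length : Int) := by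
      simp [PySem.Str.len_eq]
    rw [hlen]
    by_cases hj : j < line.toList.length
    · rw [if_pos (by exact_mod_cast hj)]
      simp [List.getElem?_eq_getElem hj]
    · rw [if_neg (by intro h; exact hj (by exact_mod_cast h))]
      simp only [List.getD, if_true]
      rw [List.getElem?_eq_none (by omega : line.toList.length ≤ j)]
      rfl
  · simp only [hk, false_and, if_false]
    simp [List.getD]

-- ===== VERDICT (by name: the statement is the Claim_ definition above) =====
theorem parse_map_spec : Claim_equal_parse_map := by
  intro content width height _
  simp only [Spec_parse_map, parse_map, parse_map_alt]
  have hbody : (fun (map : List (List String)) (y : Int) =>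
      map ++ [(PySem.List.pyRange 0 width 1).foldl (fun lst x =>
        if y < PySem.List.len (PySem.Str.splitlines content) ∧ x < PySem.Str.len (PySem.List.pyGetD (PySem.Str.splitlines content) y "") then
          lst ++ [String.ofList [(PySem.Str.pyGet? (PySem.List.pyGetD (PySem.Str.splitlines content) y "") x).getD ' ']]
        else lst ++ [" "]) []]) = (fun map y => map ++ [(fun y => (PySem.List.pyRange 0 width 1).foldl (fun lst x =>
        if y < PySem.List.len (PySem.Str.splitlines content) ∧ x < PySem.Str.len (PySem.List.pyGetD (PySem.Str.splitlines content) y "") then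
          lst ++ [String.ofList [(PySem.Str.pyGet? (PySem.List.pyGetD (PySem.Str.splitlines content) y "") x).getD ' ']]
        else lst ++ [" "]) []) y]) := rfl
  rw [hbody, PySem.List.foldl_append_singleton_eq_map, List.nil_append]
  rw [PySem.List.pyRange_one 0 height]
  simp only [List.map_map]
  apply List.map_congr_left
  intro k _
  simp only [Function.comp, zero_add]
  exact row_eq (PySem.Str.splitlines content) width k
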